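-- pv_equiv track=rewrite | github.com/dcl5255/Codility-Lessons | Lessons/5-Prefix Sums/PassingCars.py | decent_solution
-- ===== SOURCE A (Python) =====
-- def decent_solution(A): # Gives 100% on codility, but very verbose for what this should be...
--     going_east = []
--     going_west = []
--
--     count = 0
--
--     for i in range(len(A)):
--         if A[i] == 0:
--             going_east.append(i)
--         else:
--             going_west.append(i)
--
--     last_west = len(going_west) - 1
--     last_total = 0
--
--     for i in range(len(going_east) - 1, -1, -1):
--         if last_west == -100:
--             count += last_total
--             continue
--         for j in range(last_west, -2, -1):
--             if count > 1000000000: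
--                 return -1
--             if j == -1:
--                 count += last_total
--                 last_west = -100
--             elif going_east[i] < going_west[j]:
--                 last_total += 1
--             else:
--                 count += last_total
--                 last_west = j
--                 break
--
--     if count > 1000000000:
--         return -1
--
--     return count
-- ===== SOURCE B (Python) =====
-- def decent_solution(A):
--     zeros = 0
--     count = 0
--     for x in A:
--         if x == 0:
--             zeros += 1
--         else:
--             count += zeros
--             if count > 1000000000:
--                 return -1
--     return count
-- ===== Notes on version B (the rewrite author's own statement) =====
-- stated objective: simpler
-- what changed: Replaced A's construction of east/west index lists plus a backwards two-pointer scan with -100 sentinel state by a single forward pass that keeps a running count of zeros and adds it at each nonzero, with the same 1e9 cap returning -1.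
import Mathlib
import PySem

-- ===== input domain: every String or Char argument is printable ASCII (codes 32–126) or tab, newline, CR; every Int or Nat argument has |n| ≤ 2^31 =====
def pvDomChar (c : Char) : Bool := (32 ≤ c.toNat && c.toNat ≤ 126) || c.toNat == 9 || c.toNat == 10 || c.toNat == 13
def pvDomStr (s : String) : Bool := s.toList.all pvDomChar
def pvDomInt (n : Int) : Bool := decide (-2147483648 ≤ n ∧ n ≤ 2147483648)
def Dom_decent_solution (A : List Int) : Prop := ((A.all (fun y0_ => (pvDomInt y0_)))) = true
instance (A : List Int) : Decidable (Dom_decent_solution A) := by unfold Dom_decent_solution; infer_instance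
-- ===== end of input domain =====

-- B replaces A's construction of east/west index lists plus its backwards two-pointer scan
-- by a single forward pass keeping a running count of zeros (objective: simpler).

-- ===== PORT A =====
-- inner 'for j in range(last_west, -2, -1)' loop; state (j, last_west, count, last_total);
-- none = the 'return -1' inside it; going_west[j] ported as pyGetD (j is always in range here)
def pvInnerA (e : Int) (ws : List Int) (j lw cnt lt : Int) : Option (Int × Int × Int) :=
  if j < -1 then some (cnt, lw, lt)
  else if cnt > 1000000000 then none
  else if j = -1 then pvInnerA e ws (j - 1) (-100) (cnt + lt) lt
  else if e < PySem.List.pyGetD ws j 0 then pvInnerA e ws (j - 1) lw cnt (lt + 1)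
  else some (cnt + lt, j, lt)
termination_by (j + 2).toNat
decreasing_by all_goals omega

-- outer 'for i in range(len(going_east)-1, -1, -1)' loop: the descending index loop over
-- going_east is ported as recursion over going_east.reverse
def pvOuterA (ws : List Int) (es : List Int) (cnt lw lt : Int) : Option (Int × Int × Int) :=
  match es with
  | [] => some (cnt, lw, lt)
  | e :: rest =>
    if lw = -100 then pvOuterA ws rest (cnt + lt) lw lt
    else
      match pvInnerA e ws lw lw cnt lt with
      | none => none
      | some (c', lw', lt') => pvOuterA ws rest c' lw' lt'

-- the final 'if count > 1000000000: return -1 / return count', with none = an early 'return -1'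
def pvFinalA (o : Option (Int × Int × Int)) : Int :=
  match o with
  | none => -1
  | some (c, _, _) => if c > 1000000000 then -1 else c

-- 'for i in range(len(A)): if A[i] == 0: going_east.append(i) else: going_west.append(i)'
-- ported as a fold over the enumerated list (i is always in range)
def decent_solution (A : List Int) : Int :=
  let ew := (PySem.List.enumerate A).foldl
    (fun (p : List Int × List Int) iv =>
      if iv.2 = 0 then (p.1 ++ [iv.1], p.2) else (p.1, p.2 ++ [iv.1])) ([], [])
  pvFinalA (pvOuterA ew.2 ew.1.reverse 0 ((ew.2.length : Int) - 1) 0)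

-- ===== PORT B =====
-- single forward pass: zeros seen so far, pairs so far, early -1 on exceeding the cap
def pvLoopB (xs : List Int) (z c : Int) : Int :=
  match xs with
  | [] => c
  | x :: rest =>
    if x = 0 then pvLoopB rest (z + 1) c
    else
      let c' := c + z
      if c' > 1000000000 then -1 else pvLoopB rest z c'

def decent_solution_alt (A : List Int) : Int := pvLoopB A 0 0

-- ===== PRECONDITION & SPEC =====
def Spec_decent_solution (A : List Int) (out : Int) : Prop := out = decent_solution_alt A
instance (A : List Int) (out : Int) : Decidable (Spec_decent_solution A out) := by unfold Spec_decent_solution; infer_instance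

-- ===== CLAIM (what is proved, stated in full; the proofs are below) =====
def Claim_equal_decent_solution : Prop := ∀ (A : List Int), Dom_decent_solution A → Spec_decent_solution A (decent_solution A)

-- ===== LEMMAS AND PROOFS =====

def pvCap (x : Int) : Int := if x > 1000000000 then -1 else x

-- pairs contributed by xs given z zeros already seen
def pvPairs : List Int → Int → Int
  | [], _ => 0
  | x :: xs, z => if x = 0 then pvPairs xs (z + 1) else z + pvPairs xs z

def pvNzc : List Int → Int
  | [] => 0
  | x :: xs => (if x = 0 then 0 else 1) + pvNzc xs

def pvCgt (e : Int) (ws : List Int) : Int := ((ws.countP fun w => decide (e < w)) : Int)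

def pvSE (es ws : List Int) : Int := (es.map fun e => pvCgt e ws).sum

-- reference east/west index lists
def pvEW : List Int → Int → List Int × List Int
  | [], _ => ([], [])
  | x :: xs, k =>
    let p := pvEW xs (k + 1)
    if x = 0 then (k :: p.1, p.2) else (p.1, k :: p.2)

theorem pvPairs_nonneg (xs : List Int) (z : Int) (hz : 0 ≤ z) : 0 ≤ pvPairs xs z := by
  induction xs generalizing z with
  | nil => simp [pvPairs]
  | cons x xs ih =>
    simp only [pvPairs]
    split_ifs
    · exact ih (z + 1) (by omega)
    · have := ih z hz; omega

theorem pvPairs_shift (xs : List Int) (z : Int) :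
    pvPairs xs z = pvPairs xs 0 + z * pvNzc xs := by
  induction xs generalizing z with
  | nil => simp [pvPairs, pvNzc]
  | cons x xs ih =>
    simp only [pvPairs, pvNzc]
    split_ifs with h
    · rw [ih (z + 1), ih (0 + 1)]; ring
    · rw [ih z]; ring

theorem pvLoopB_spec (xs : List Int) (z c : Int) (hz : 0 ≤ z) (hc : 0 ≤ c)
    (hcap : c ≤ 1000000000) : pvLoopB xs z c = pvCap (c + pvPairs xs z) := by
  induction xs generalizing z c with
  | nil => simp [pvLoopB, pvPairs, pvCap]; omega
  | cons x xs ih =>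
    simp only [pvLoopB, pvPairs]
    split_ifs with h h2
    · exact ih (z + 1) c (by omega) hc hcap
    · have := pvPairs_nonneg xs z hz
      simp only [pvCap]
      rw [if_pos (by omega)]
    · rw [ih z (c + z) hz (by omega) (by omega)]
      unfold pvCap
      split_ifs <;> omega

theorem pvEW_build (xs : List Int) (k : Int) (acc : List Int × List Int) :
    (PySem.List.enumerate xs k).foldl
      (fun (p : List Int × List Int) iv =>
        if iv.2 = 0 then (p.1 ++ [iv.1], p.2) else (p.1, p.2 ++ [iv.1])) acc
    = (acc.1 ++ (pvEW xs k).1, acc.2 ++ (pvEW xs k).2) := by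
  induction xs generalizing k acc with
  | nil => simp [PySem.List.enumerate_nil, pvEW]
  | cons x xs ih =>
    rw [PySem.List.enumerate_cons, List.foldl_cons]
    simp only [pvEW]
    split_ifs with h <;> rw [ih] <;> simp

theorem pvEW_ge (xs : List Int) (k : Int) :
    (∀ y ∈ (pvEW xs k).1, k ≤ y) ∧ (∀ y ∈ (pvEW xs k).2, k ≤ y) := by
  induction xs generalizing k with
  | nil => simp [pvEW]
  | cons x xs ih =>
    have h1 := (ih (k + 1)).1
    have h2 := (ih (k + 1)).2
    simp only [pvEW]
    split_ifs with h
    · constructor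
      · intro y hy; rcases List.mem_cons.1 hy with rfl | hy
        · omega
        · have := h1 y hy; omega
      · intro y hy; have := h2 y hy; omega
    · constructor
      · intro y hy; have := h1 y hy; omega
      · intro y hy; rcases List.mem_cons.1 hy with rfl | hy
        · omega
        · have := h2 y hy; omega

theorem pvEW_sorted (xs : List Int) (k : Int) :
    (pvEW xs k).1.Pairwise (· < ·) ∧ (pvEW xs k).2.Pairwise (· < ·) := by
  induction xs generalizing k with
  | nil => simp [pvEW]
  | cons x xs ih =>
    have hg := pvEW_ge xs (k + 1)
    simp only [pvEW]
    split_ifs with h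
    · exact ⟨List.pairwise_cons.2 ⟨fun y hy => by have := hg.1 y hy; omega, (ih (k + 1)).1⟩,
        (ih (k + 1)).2⟩
    · exact ⟨(ih (k + 1)).1,
        List.pairwise_cons.2 ⟨fun y hy => by have := hg.2 y hy; omega, (ih (k + 1)).2⟩⟩

theorem pvEW_disjoint (xs : List Int) (k : Int) :
    ∀ y ∈ (pvEW xs k).1, y ∉ (pvEW xs k).2 := by
  induction xs generalizing k with
  | nil => simp [pvEW]
  | cons x xs ih =>
    have hg := pvEW_ge xs (k + 1)
    simp only [pvEW]
    split_ifs with h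
    · intro y hy
      rcases List.mem_cons.1 hy with rfl | hy
      · intro hc; have := hg.2 y hc; omega
      · exact ih (k + 1) y hy
    · intro y hy hc
      rcases List.mem_cons.1 hc with rfl | hc
      · have := hg.1 y hy; omega
      · exact ih (k + 1) y hy hc

theorem pvEW_len2 (xs : List Int) (k : Int) :
    ((pvEW xs k).2.length : Int) = pvNzc xs := by
  induction xs generalizing k with
  | nil => simp [pvEW, pvNzc]
  | cons x xs ih =>
    simp only [pvEW, pvNzc]
    split_ifs with h
    · simpa using ih (k + 1)
    · simp [ih (k + 1)]; omega

theorem pvSE_ew (xs : List Int) (k : Int) :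
    pvSE (pvEW xs k).1 (pvEW xs k).2 = pvPairs xs 0 := by
  induction xs generalizing k with
  | nil => simp [pvEW, pvSE, pvPairs]
  | cons x xs ih =>
    have hg := pvEW_ge xs (k + 1)
    simp only [pvEW, pvPairs]
    split_ifs with h
    · -- east head k; its count is the whole west list
      have hall : pvCgt k (pvEW xs (k + 1)).2 = ((pvEW xs (k + 1)).2.length : Int) := by
        unfold pvCgt
        congr 1
        apply List.countP_eq_length.2
        intro w hw
        have := hg.2 w hw
        simpa using by omega
      simp only [pvSE, List.map_cons, List.sum_cons]
      have : pvSE (pvEW xs (k + 1)).1 (pvEW xs (k + 1)).2 = pvPairs xs 0 := ih (k + 1)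
      rw [show ((pvEW xs (k+1)).1.map fun e => pvCgt e (pvEW xs (k+1)).2).sum
            = pvSE (pvEW xs (k+1)).1 (pvEW xs (k+1)).2 from rfl, this, hall,
        pvEW_len2 xs (k + 1), pvPairs_shift xs (0 + 1)]
      ring
    · -- west head k: invisible to every east element (all > k)
      have heq : ∀ e ∈ (pvEW xs (k + 1)).1, pvCgt e (k :: (pvEW xs (k + 1)).2)
          = pvCgt e (pvEW xs (k + 1)).2 := by
        intro e he
        have := hg.1 e he
        unfold pvCgt
        rw [List.countP_cons]
        simp only [decide_eq_true_eq]
        rw [if_neg (by omega)]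
        simp
      simp only [pvSE]
      rw [List.map_congr_left heq]
      simpa using ih (k + 1)

theorem pvSE_nonneg (es ws : List Int) : 0 ≤ pvSE es ws := by
  induction es with
  | nil => simp [pvSE]
  | cons e es ih =>
    simp only [pvSE, List.map_cons, List.sum_cons] at *
    have : (0 : Int) ≤ pvCgt e ws := by unfold pvCgt; positivity
    omega

theorem pvInnerA_spec (e : Int) (ws₁ ws₂ : List Int) (lw cnt lt : Int)
    (hs : (ws₁ ++ ws₂).Pairwise (· < ·)) (hne : e ∉ ws₁)
    (h2 : ∀ w ∈ ws₂, e < w) (hlt : lt = (ws₂.length : Int))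
    (hcap : cnt ≤ 1000000000) :
    ∃ ws₁' ws₂', ws₁ ++ ws₂ = ws₁' ++ ws₂' ∧ (∀ w ∈ ws₁', w < e) ∧ (∀ w ∈ ws₂', e < w) ∧
      pvInnerA e (ws₁ ++ ws₂) ((ws₁.length : Int) - 1) lw cnt lt
        = some (cnt + (ws₂'.length : Int),
            (if ws₁' = [] then -100 else (ws₁'.length : Int) - 1), (ws₂'.length : Int)) := by
  induction ws₁ using List.reverseRecOn generalizing ws₂ lw lt with
  | nil =>
    refine ⟨[], ws₂, rfl, by simp, h2, ?_⟩
    rw [pvInnerA]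
    simp only [List.length_nil]
    rw [if_neg (by omega), if_neg (by omega), if_pos (by omega)]
    rw [pvInnerA]
    rw [if_pos (by omega)]
    simp [hlt]
  | append_singleton ys w ih =>
    have hj : ((ys ++ [w]).length : Int) - 1 = (ys.length : Int) := by simp
    have hget : PySem.List.pyGetD ((ys ++ [w]) ++ ws₂) ((ys.length : Int)) 0 = w := by
      rw [show ((ys.length : Int)) = ((ys.length : Nat) : Int) from rfl,
        PySem.List.pyGetD_natCast]
      rw [List.append_assoc]
      rw [List.getD_eq_getElem?_getD, List.getElem?_append_right (le_refl _)]
      simp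
    rw [hj, pvInnerA]
    rw [if_neg (by omega), if_neg (by omega), if_neg (by omega), hget]
    by_cases hew : e < w
    · rw [if_pos hew]
      have hs' : (ys ++ (w :: ws₂)).Pairwise (· < ·) := by
        simpa [List.append_assoc] using hs
      have hne' : e ∉ ys := fun h => hne (List.mem_append_left _ h)
      have h2' : ∀ v ∈ w :: ws₂, e < v := by
        intro v hv; rcases List.mem_cons.1 hv with rfl | hv
        · exact hew
        · exact h2 v hv
      obtain ⟨a, b, hab, ha, hb, hres⟩ := ih (w :: ws₂) lw (lt + 1) hs' hne' h2'
        (by simp [hlt])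
      refine ⟨a, b, by rw [List.append_assoc, List.singleton_append]; exact hab, ha, hb, ?_⟩
      rw [show ys ++ [w] ++ ws₂ = ys ++ w :: ws₂ by simp]
      exact hres
    · rw [if_neg hew]
      have hwe : w < e := by
        have : e ≠ w := fun h => hne (by simp [h])
        omega
      refine ⟨ys ++ [w], ws₂, rfl, ?_, h2, ?_⟩
      · intro v hv
        rcases List.mem_append.1 hv with hv | hv
        · have hvw : v < w :=
            (List.pairwise_append.1 (List.pairwise_append.1 hs).1).2.2 v hv w (by simp)
          omega
        · simp at hv; omega
      · rw [if_neg (by simp), hj, hlt]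

theorem pvOuterA_spec (es : List Int) (ws₁ ws₂ : List Int) (cnt lw lt : Int)
    (hs : (ws₁ ++ ws₂).Pairwise (· < ·)) (hd : es.Pairwise (· > ·))
    (hnm : ∀ e ∈ es, e ∉ ws₁ ++ ws₂) (h2 : ∀ e ∈ es, ∀ w ∈ ws₂, e < w)
    (hlt : lt = (ws₂.length : Int)) (hc : 0 ≤ cnt)
    (hlw : (lw = -100 ∧ ws₁ = []) ∨ lw = (ws₁.length : Int) - 1) :
    pvFinalA (pvOuterA (ws₁ ++ ws₂) es cnt lw lt)
      = pvCap (cnt + pvSE es (ws₁ ++ ws₂)) := by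
  induction es generalizing ws₁ ws₂ cnt lw lt with
  | nil => simp [pvOuterA, pvFinalA, pvSE, pvCap]
  | cons e rest ih =>
    have hdr : rest.Pairwise (· > ·) := (List.pairwise_cons.1 hd).2
    have hdl : ∀ e' ∈ rest, e' < e := fun e' h => (List.pairwise_cons.1 hd).1 e' h
    have hse : pvSE (e :: rest) (ws₁ ++ ws₂)
        = pvCgt e (ws₁ ++ ws₂) + pvSE rest (ws₁ ++ ws₂) := by simp [pvSE]
    rcases hlw with ⟨rfl, rfl⟩ | hlw
    · -- last_west = -100: just add last_total = len ws₂ = count of wests above e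
      simp only [List.nil_append] at *
      rw [pvOuterA, if_pos rfl]
      have hall : pvCgt e ws₂ = (ws₂.length : Int) := by
        unfold pvCgt
        congr 1
        apply List.countP_eq_length.2
        intro w hw
        simpa using h2 e (by simp) w hw
      have hih := ih ([]) ws₂ (cnt + lt) (-100) lt (by simpa using hs) hdr
        (fun e' h => hnm e' (by simp [h])) (fun e' h => h2 e' (by simp [h])) hlt
        (by omega) (Or.inl ⟨rfl, rfl⟩)
      simp only [List.nil_append] at hih
      rw [hih, hse, hall, hlt]
      ring_nf
    · rw [pvOuterA]
      have hlwne : lw ≠ -100 := by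
        have : (0 : Int) ≤ (ws₁.length : Int) := by positivity
        omega
      rw [if_neg hlwne]
      by_cases hbig : cnt > 1000000000
      · -- the inner loop's first cap check fires: return -1
        have hnone : pvInnerA e (ws₁ ++ ws₂) lw lw cnt lt = none := by
          rw [pvInnerA]
          have : (0 : Int) ≤ (ws₁.length : Int) := by positivity
          rw [if_neg (by omega), if_pos hbig]
        rw [hnone]
        have := pvSE_nonneg (e :: rest) (ws₁ ++ ws₂)
        simp only [pvFinalA, pvCap]
        rw [if_pos (by omega)]
      · subst hlw
        obtain ⟨a, b, hab, ha, hb, hres⟩ := pvInnerA_spec e ws₁ ws₂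
          ((ws₁.length : Int) - 1) cnt lt hs
          (fun h => hnm e (by simp) (List.mem_append_left _ h)) (h2 e (by simp)) hlt
          (by omega)
        have hcgt : pvCgt e (ws₁ ++ ws₂) = (b.length : Int) := by
          unfold pvCgt
          rw [hab, List.countP_append]
          have hz : a.countP (fun w => decide (e < w)) = 0 := by
            apply List.countP_eq_zero.2
            intro w hw
            have := ha w hw
            simpa using by omega
          have hl : b.countP (fun w => decide (e < w)) = b.length := by
            apply List.countP_eq_length.2
            intro w hw
            simpa using hb w hw
          rw [hz, hl]
          simp
        have hih := ih a b (cnt + (b.length : Int))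
          (if a = [] then -100 else (a.length : Int) - 1) (b.length : Int) (hab ▸ hs)
          hdr (fun e' h => hab ▸ hnm e' (by simp [h]))
          (fun e' h' w hw => lt_trans (hdl e' h') (hb w hw)) rfl (by omega)
          (by
            by_cases hae : a = []
            · exact Or.inl ⟨if_pos hae, hae⟩
            · exact Or.inr (if_neg hae))
        rw [← hab] at hih
        rw [hres]
        show pvFinalA (pvOuterA (ws₁ ++ ws₂) rest (cnt + (b.length : Int))
          (if a = [] then -100 else (a.length : Int) - 1) ((b.length : Int)))
          = pvCap (cnt + pvSE (e :: rest) (ws₁ ++ ws₂))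
        rw [hih, hse, hcgt]
        ring_nf

-- ===== VERDICT (by name: the statement is the Claim_ definition above) =====
theorem decent_solution_spec : Claim_equal_decent_solution := by
  intro A _
  unfold Spec_decent_solution decent_solution decent_solution_alt
  rw [pvEW_build A 0 ([], [])]
  simp only [List.nil_append]
  have hs2 := (pvEW_sorted A 0).2
  have hs1 := (pvEW_sorted A 0).1
  have h := pvOuterA_spec ((pvEW A 0).1.reverse) ((pvEW A 0).2) [] 0
    (((pvEW A 0).2.length : Int) - 1) 0
    (by simpa using hs2)
    (by
      rw [List.pairwise_reverse]
      exact hs1)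
    (by
      intro e he
      simp only [List.append_nil]
      exact pvEW_disjoint A 0 e (List.mem_reverse.1 he))
    (by simp) (by simp) (le_refl 0) (Or.inr rfl)
  simp only [List.append_nil] at h
  rw [h]
  have hrev : pvSE ((pvEW A 0).1.reverse) ((pvEW A 0).2)
      = pvSE ((pvEW A 0).1) ((pvEW A 0).2) := by
    unfold pvSE
    rw [List.map_reverse, List.sum_reverse]
  rw [hrev, pvSE_ew A 0, pvLoopB_spec A 0 0 (le_refl 0) (le_refl 0) (by omega)]
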